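-- pv_equiv track=rewrite | github.com/malgohip/PortafolioMalgo | 2Intro CC/Ejercicios Code Abey/Me quedó grande muchachos/291 Squirrels vs. Acorns.py | count_valid_pairings
-- ===== SOURCE A (Python) =====
-- def count_valid_pairings(acorns, squirrels):
--     # Sort the strengths of acorns and squirrels
--     acorns.sort()
--     squirrels.sort()
--
--     # Count valid pairings using a two-pointer technique
--     valid_count = 0
--     j = 0  # Pointer for squirrels
--
--     for acorn in acorns:
--         while j < len(squirrels) and squirrels[j] < acorn:
--             j += 1
--         valid_count += len(squirrels) - j
--
--     return valid_count
-- ===== SOURCE B (Python) =====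
-- def count_valid_pairings(acorns, squirrels):
--     # Same in-place sorting of both arguments as the original.
--     acorns.sort()
--     squirrels.sort()
--     n = len(squirrels)
--     total = 0
--     for acorn in acorns:
--         # bisect_left: first index whose squirrel is >= acorn
--         lo, hi = 0, n
--         while lo < hi:
--             mid = (lo + hi) // 2
--             if squirrels[mid] < acorn:
--                 lo = mid + 1
--             else:
--                 hi = mid
--         total += n - lo
--     return total
-- ===== Notes on version B (the rewrite author's own statement) =====
-- stated objective: alternative
-- what changed: Replaces the shared monotone two-pointer sweep (a running pointer carried across acorns) with an independent bisect_left binary search over the sorted squirrels for each acorn; both arguments are still sorted in place.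
import Mathlib
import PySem

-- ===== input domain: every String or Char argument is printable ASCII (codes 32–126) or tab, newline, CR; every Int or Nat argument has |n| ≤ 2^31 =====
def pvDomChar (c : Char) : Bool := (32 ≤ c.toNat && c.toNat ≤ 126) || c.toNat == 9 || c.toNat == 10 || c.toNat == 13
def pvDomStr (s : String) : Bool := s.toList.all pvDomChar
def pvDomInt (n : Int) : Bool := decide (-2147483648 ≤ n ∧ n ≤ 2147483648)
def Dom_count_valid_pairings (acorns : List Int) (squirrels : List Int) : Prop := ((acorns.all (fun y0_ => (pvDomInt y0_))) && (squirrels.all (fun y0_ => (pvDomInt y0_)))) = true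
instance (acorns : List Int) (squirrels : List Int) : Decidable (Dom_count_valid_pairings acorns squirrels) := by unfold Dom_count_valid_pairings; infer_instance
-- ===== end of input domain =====

-- B replaces A's shared two-pointer sweep with an independent binary search (bisect_left) per
-- acorn over the sorted squirrels; same return value, same in-place sorting of both arguments.


-- ===== PORT A =====
-- the inner `while j < len(squirrels) and squirrels[j] < acorn: j += 1` loop
def pvSkipA (ss : List Int) (a : Int) (j : Nat) : Nat :=
  if h : j < ss.length then
    if ss[j] < a then pvSkipA ss a (j + 1) else j
  else j
termination_by ss.length - j

def count_valid_pairings (acorns : List Int) (squirrels : List Int) : Int :=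
  let ac := PySem.List.sorted acorns (fun x => x)
  let ss := PySem.List.sorted squirrels (fun x => x)
  (ac.foldl (fun (st : Int × Nat) a =>
      let j := pvSkipA ss a st.2
      (st.1 + ((ss.length : Int) - (j : Int)), j)) ((0 : Int), (0 : Nat))).1

-- ===== PORT B =====
-- Source B's hand-written bisect_left loop: `while lo < hi: mid = (lo+hi)//2; …`
def pvBisectB (ss : List Int) (a : Int) (lo hi : Nat) : Nat :=
  if h : lo < hi then
    -- mid = (lo + hi) // 2
    if ss[(lo + hi) / 2]! < a then pvBisectB ss a ((lo + hi) / 2 + 1) hi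
    else pvBisectB ss a lo ((lo + hi) / 2)
  else lo
termination_by hi - lo

def count_valid_pairings_alt (acorns : List Int) (squirrels : List Int) : Int :=
  let ac := PySem.List.sorted acorns (fun x => x)
  let ss := PySem.List.sorted squirrels (fun x => x)
  let n := ss.length
  ac.foldl (fun total a => total + ((n : Int) - (pvBisectB ss a 0 n : Int))) 0

-- ===== PRECONDITION & SPEC =====
def Spec_count_valid_pairings (acorns : List Int) (squirrels : List Int) (out : Int) : Prop := out = count_valid_pairings_alt acorns squirrels
instance (acorns : List Int) (squirrels : List Int) (out : Int) : Decidable (Spec_count_valid_pairings acorns squirrels out) := by unfold Spec_count_valid_pairings; infer_instance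

-- ===== CLAIM (what is proved, stated in full; the proofs are below) =====
def Claim_equal_count_valid_pairings : Prop := ∀ (acorns : List Int) (squirrels : List Int), Dom_count_valid_pairings acorns squirrels → Spec_count_valid_pairings acorns squirrels (count_valid_pairings acorns squirrels)

-- ===== LEMMAS AND PROOFS =====

-- `pvF ss a` = number of squirrels strictly below `a`; on a sorted list this is the first
-- index holding a squirrel ≥ a (bisect_left), and the two-pointer pointer stabilises there.
def pvF (ss : List Int) (a : Int) : Nat := ss.countP (fun s => decide (s < a))

theorem pvF_le_length (ss : List Int) (a : Int) : pvF ss a ≤ ss.length :=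
  List.countP_le_length

theorem pvF_mono (ss : List Int) {a b : Int} (hab : a ≤ b) : pvF ss a ≤ pvF ss b := by
  apply List.countP_mono_left
  intro x _ hx
  simp only [decide_eq_true_eq] at *
  omega

theorem pvF_iff (ss : List Int) (hss : ss.Pairwise (· ≤ ·)) (a : Int)
    (i : Nat) (hi : i < ss.length) : ss[i] < a ↔ i < pvF ss a := by
  induction ss generalizing i with
  | nil => simp at hi
  | cons x t ih =>
    rcases List.pairwise_cons.mp hss with ⟨h1, h2⟩
    have hcons : pvF (x :: t) a = pvF t a + (if x < a then 1 else 0) := by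
      unfold pvF
      rw [List.countP_cons]
      by_cases hx : x < a <;> simp [hx]
    rw [hcons]
    cases i with
    | zero =>
      simp only [List.getElem_cons_zero]
      by_cases hx : x < a
      · simp [hx]
      · rw [if_neg hx]
        constructor
        · intro h; exact absurd h hx
        · intro h
          have hpos : 0 < pvF t a := by omega
          obtain ⟨y, hy, hya⟩ := List.countP_pos_iff.mp hpos
          simp only [decide_eq_true_eq] at hya
          exact absurd (lt_of_le_of_lt (h1 y hy) hya) hx
    | succ i =>
      simp only [List.getElem_cons_succ]
      have hi' : i < t.length := by simpa using hi
      have hih := ih h2 i hi'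
      by_cases hx : x < a
      · rw [if_pos hx]
        constructor
        · intro h; have := hih.mp h; omega
        · intro h; exact hih.mpr (by omega)
      · rw [if_neg hx]
        constructor
        · intro h
          exact absurd (lt_of_le_of_lt (h1 _ (List.getElem_mem hi')) h) hx
        · intro h
          exact hih.mpr (by omega)

theorem pvSkipA_eq (ss : List Int) (hss : ss.Pairwise (· ≤ ·)) (a : Int)
    (lo : Nat) (hlo : lo ≤ pvF ss a) : pvSkipA ss a lo = pvF ss a := by
  unfold pvSkipA
  rcases Nat.lt_or_ge lo (pvF ss a) with hlt | hge
  · have hlen : lo < ss.length := lt_of_lt_of_le hlt (pvF_le_length ss a)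
    have : ss[lo] < a := (pvF_iff ss hss a lo hlen).mpr hlt
    rw [dif_pos hlen, if_pos this]
    exact pvSkipA_eq ss hss a (lo + 1) hlt
  · have heq : lo = pvF ss a := le_antisymm hlo hge
    by_cases hlen : lo < ss.length
    · have : ¬ ss[lo] < a := by
        intro h
        exact absurd ((pvF_iff ss hss a lo hlen).mp h) (by omega)
      rw [dif_pos hlen, if_neg this]
      exact heq
    · rw [dif_neg hlen]; exact heq
termination_by ss.length - lo
decreasing_by
  have := pvF_le_length ss a
  omega

theorem pvBisectB_eq (ss : List Int) (hss : ss.Pairwise (· ≤ ·)) (a : Int)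
    (lo hi : Nat) (hlo : lo ≤ pvF ss a) (hhi : pvF ss a ≤ hi) (hh : hi ≤ ss.length) :
    pvBisectB ss a lo hi = pvF ss a := by
  unfold pvBisectB
  by_cases h : lo < hi
  · rw [dif_pos h]
    have hmidlt : (lo + hi) / 2 < hi := by omega
    have hmidge : lo ≤ (lo + hi) / 2 := by omega
    have hmlen : (lo + hi) / 2 < ss.length := lt_of_lt_of_le hmidlt hh
    rw [getElem!_pos ss ((lo + hi) / 2) hmlen]
    by_cases hm : ss[(lo + hi) / 2] < a
    · rw [if_pos hm]
      have : (lo + hi) / 2 < pvF ss a := (pvF_iff ss hss a _ hmlen).mp hm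
      exact pvBisectB_eq ss hss a ((lo + hi) / 2 + 1) hi (by omega) hhi hh
    · rw [if_neg hm]
      have : ¬ ((lo + hi) / 2 < pvF ss a) := fun hc => hm ((pvF_iff ss hss a _ hmlen).mpr hc)
      exact pvBisectB_eq ss hss a lo ((lo + hi) / 2) hlo (by omega) (by omega)
  · rw [dif_neg h]
    omega
termination_by hi - lo
decreasing_by all_goals omega

-- the two-pointer fold, with any valid starting pointer, equals the per-acorn sum
theorem foldA_eq (ss : List Int) (hss : ss.Pairwise (· ≤ ·)) :
    ∀ (ac : List Int), ac.Pairwise (· ≤ ·) →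
    ∀ (c : Int) (j0 : Nat), (∀ a ∈ ac, j0 ≤ pvF ss a) →
    (ac.foldl (fun (st : Int × Nat) a =>
        let j := pvSkipA ss a st.2
        (st.1 + ((ss.length : Int) - (j : Int)), j)) (c, j0)).1
      = ac.foldl (fun total a => total + ((ss.length : Int) - (pvF ss a : Int))) c := by
  intro ac
  induction ac with
  | nil => intro _ c j0 _; simp
  | cons a rest ih =>
    intro hac c j0 hj
    rcases List.pairwise_cons.mp hac with ⟨h1, h2⟩
    have hja : j0 ≤ pvF ss a := hj a (by simp)
    simp only [List.foldl_cons]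
    rw [pvSkipA_eq ss hss a j0 hja]
    exact ih h2 _ (pvF ss a) (fun a' ha' => pvF_mono ss (h1 a' ha'))

-- ===== VERDICT (by name: the statement is the Claim_ definition above) =====
theorem count_valid_pairings_spec : Claim_equal_count_valid_pairings := by
  intro acorns squirrels _
  unfold Spec_count_valid_pairings count_valid_pairings count_valid_pairings_alt
  have hss := PySem.List.sorted_pairwise squirrels (fun x => x)
  have hac := PySem.List.sorted_pairwise acorns (fun x => x)
  simp only
  rw [foldA_eq (PySem.List.sorted squirrels (fun x => x)) hss
      (PySem.List.sorted acorns (fun x => x)) hac 0 0 (fun a _ => Nat.zero_le _)]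
  apply PySem.List.foldl_congr_mem _ _ _ _ ?_
  intro total a ha
  rw [pvBisectB_eq (PySem.List.sorted squirrels (fun x => x)) hss a 0 _
      (Nat.zero_le _) (pvF_le_length _ a) le_rfl]
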